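-- pv_equiv track=rewrite | github.com/miliar/Code_Jam_Webscraper | solutions_python/Problem_55/79.py | build_f
-- ===== SOURCE A (Python) =====
-- def build_f(g, k):
--     N = len(g)
--     L = [0] * N
--     for i in range(N):
--         tg = g[i:] + g[:i]
--         s = 0
--         for j in range(N):
--             s += tg[j]
--             if s > k:
--                 break
--         else:
--             s += tg[j]
--         L[i] = ((i + j) % N, s - tg[j])
--     return L
-- ===== SOURCE B (Python) =====
-- def build_f(g, k):
--     # O(N log N): prefix sums of the doubled array + a max segment tree
--     # answering "first index m in [lo, hi) with P[m] > threshold".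
--     N = len(g)
--     doubled = g + g
--     P = [0]
--     for x in doubled:
--         P.append(P[-1] + x)
--     tree = _build(P, 0, len(P))
--
--     out = []
--     for i in range(N):
--         m = _first_above(tree, 0, len(P), k + P[i], i + 1, i + N + 1)
--         if m is None:
--             j, val = N - 1, P[i + N] - P[i]
--         else:
--             j, val = m - 1 - i, P[m - 1] - P[i]
--         out.append(((i + j) % N, val))
--     return out
--
--
-- def _build(P, lo, hi):
--     # segment tree node over P[lo:hi]: leaf value, or (max, left, right)
--     if hi <= lo + 1:
--         return ('leaf', P[lo])
--     mid = (lo + hi) // 2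
--     l = _build(P, lo, mid)
--     r = _build(P, mid, hi)
--     return ('node', max(l[1] if l[0] == 'leaf' else l[1], r[1] if r[0] == 'leaf' else r[1]), l, r)
--
--
-- def _first_above(t, loT, hiT, thr, lo, hi):
--     # first index m with lo <= m < hi and P[m] > thr, inside tree segment [loT, hiT)
--     if hiT <= lo or hi <= loT:
--         return None
--     if t[0] == 'leaf':
--         return loT if lo <= loT < hi and t[1] > thr else None
--     if t[1] <= thr:
--         return None
--     mid = (loT + hiT) // 2
--     res = _first_above(t[2], loT, mid, thr, lo, hi)
--     return res if res is not None else _first_above(t[3], mid, hiT, thr, lo, hi)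
-- ===== Notes on version B (the rewrite author's own statement) =====
-- stated objective: faster
-- what changed: Instead of rebuilding each rotation and re-summing it from scratch (O(N^2)), B computes prefix sums of the doubled list once and answers each start's 'first index whose prefix sum exceeds the threshold' with a max segment tree descent (O(N log N)).
import Mathlib
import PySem

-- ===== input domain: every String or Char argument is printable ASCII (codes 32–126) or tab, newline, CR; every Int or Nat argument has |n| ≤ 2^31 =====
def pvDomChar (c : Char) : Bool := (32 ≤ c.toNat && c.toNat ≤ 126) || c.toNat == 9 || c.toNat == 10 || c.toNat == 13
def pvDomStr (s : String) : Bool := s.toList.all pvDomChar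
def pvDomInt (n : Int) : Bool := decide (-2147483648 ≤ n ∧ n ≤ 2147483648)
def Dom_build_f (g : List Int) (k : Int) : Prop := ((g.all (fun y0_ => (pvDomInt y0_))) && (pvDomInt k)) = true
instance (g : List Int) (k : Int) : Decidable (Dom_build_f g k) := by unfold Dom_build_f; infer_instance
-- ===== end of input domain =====

-- B replaces A's per-start rotation copy and re-summation (O(N^2)) by prefix sums of the
-- doubled list plus a max segment tree answering "first index with prefix sum above the
-- threshold" (O(N log N)); measured faster. Return-value equivalence only (A mutates no argument).

-- ===== PORT A =====
-- inner 'for j in range(N): s += tg[j]; if s > k: break' loop; carries the leftover loop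
-- variable (jp) like Python does; returns (j, s, broke). tg[j] with j always in range,
-- ported as pyGetD (exact there).
def pvAFor (tg : List Int) (k : Int) : List Nat → Int → Nat → Nat × Int × Bool
  | [], s, jp => (jp, s, false)
  | j :: rest, s, _ =>
    let s' := s + PySem.List.pyGetD tg (j : Int) 0
    if s' > k then (j, s', true) else pvAFor tg k rest s' j

def build_f (g : List Int) (k : Int) : List (Int × Int) :=
  let N := g.length
  (List.range N).map (fun (i : Nat) =>
    let tg := PySem.List.slice g (some (i : Int)) none ++ PySem.List.slice g none (some (i : Int))
    let r := pvAFor tg k (List.range N) 0 0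
    let j := r.1
    let s := if r.2.2 then r.2.1 else r.2.1 + PySem.List.pyGetD tg (j : Int) 0
    (PySem.Int.mod ((i : Int) + (j : Int)) (N : Int), s - PySem.List.pyGetD tg (j : Int) 0))

-- ===== PORT B =====
-- segment tree over the prefix-sum list P of g ++ g
inductive PvTree where
  | leaf : Int → PvTree
  | node : Int → PvTree → PvTree → PvTree

def PvTree.mx : PvTree → Int
  | .leaf v => v
  | .node m _ _ => m

-- P = [0]; for x in doubled: P.append(P[-1] + x)  (carrying the running last element)
def pvPrefix : List Int → Int → List Int
  | [], s => [s]
  | x :: rest, s => s :: pvPrefix rest (s + x)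

def pvBuild (P : List Int) (lo hi : Nat) : PvTree :=
  if hi ≤ lo + 1 then .leaf (P.getD lo 0)
  else
    let mid := (lo + hi) / 2
    let l := pvBuild P lo mid
    let r := pvBuild P mid hi
    .node (max l.mx r.mx) l r
termination_by hi - lo
decreasing_by all_goals omega

def pvQuery (t : PvTree) (loT hiT : Nat) (thr : Int) (lo hi : Nat) : Option Nat :=
  if hiT ≤ lo ∨ hi ≤ loT then none
  else
    match t with
    | .leaf v => if lo ≤ loT ∧ loT < hi ∧ thr < v then some loT else none
    | .node mx l r =>
      if mx ≤ thr then none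
      else
        let mid := (loT + hiT) / 2
        match pvQuery l loT mid thr lo hi with
        | some m => some m
        | none => pvQuery r mid hiT thr lo hi

def build_f_alt (g : List Int) (k : Int) : List (Int × Int) :=
  let N := g.length
  let P := pvPrefix (g ++ g) 0
  let t := pvBuild P 0 P.length
  (List.range N).map (fun (i : Nat) =>
    let Pi := P.getD i 0
    match pvQuery t 0 P.length (k + Pi) (i + 1) (i + N + 1) with
    | none => (PySem.Int.mod ((i : Int) + ((N - 1 : Nat) : Int)) (N : Int), P.getD (i + N) 0 - Pi)
    | some m => (PySem.Int.mod ((i : Int) + ((m - 1 - i : Nat) : Int)) (N : Int), P.getD (m - 1) 0 - Pi))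

-- ===== PRECONDITION & SPEC =====
def Spec_build_f (g : List Int) (k : Int) (out : List (Int × Int)) : Prop := out = build_f_alt g k
instance (g : List Int) (k : Int) (out : List (Int × Int)) : Decidable (Spec_build_f g k out) := by unfold Spec_build_f; infer_instance

-- ===== CLAIM (what is proved, stated in full; the proofs are below) =====
def Claim_equal_build_f : Prop := ∀ (g : List Int) (k : Int), Dom_build_f g k → Spec_build_f g k (build_f g k)

-- ===== LEMMAS AND PROOFS =====

lemma pvPrefix_length (xs : List Int) (s : Int) : (pvPrefix xs s).length = xs.length + 1 := by
  induction xs generalizing s with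
  | nil => simp [pvPrefix]
  | cons x rest ih => simp [pvPrefix, ih]

lemma pvPrefix_getD (xs : List Int) (s : Int) (m : Nat) (hm : m ≤ xs.length) :
    (pvPrefix xs s).getD m 0 = s + (xs.take m).sum := by
  induction xs generalizing s m with
  | nil =>
    have : m = 0 := by simpa using hm
    subst this; simp [pvPrefix]
  | cons x rest ih =>
    cases m with
    | zero => simp [pvPrefix]
    | succ m =>
      simp only [pvPrefix, List.getD_cons_succ, List.take_succ_cons, List.sum_cons]
      rw [ih (s + x) m (by simpa using hm)]
      ring

lemma pvBuild_mx (P : List Int) (lo hi m : Nat) (h1 : lo ≤ m) (h2 : m < hi) :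
    P.getD m 0 ≤ (pvBuild P lo hi).mx := by
  unfold pvBuild
  split
  · have : m = lo := by omega
    subst this; simp [PvTree.mx]
  · simp only [PvTree.mx]
    by_cases hm : m < (lo + hi) / 2
    · exact le_max_of_le_left (pvBuild_mx P lo ((lo + hi) / 2) m h1 hm)
    · exact le_max_of_le_right (pvBuild_mx P ((lo + hi) / 2) hi m (by omega) h2)
termination_by hi - lo
decreasing_by all_goals omega

lemma pvQuery_build (P : List Int) (loT hiT : Nat) (thr : Int) (lo hi : Nat) (h : loT < hiT) :
    pvQuery (pvBuild P loT hiT) loT hiT thr lo hi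
      = (List.range' loT (hiT - loT)).find? (fun m => decide (lo ≤ m ∧ m < hi ∧ thr < P.getD m 0)) := by
  rw [pvBuild]
  split
  next h1 =>
    have h2 : hiT - loT = 1 := by omega
    rw [h2, List.range'_one]
    by_cases hd : hiT ≤ lo ∨ hi ≤ loT
    · rw [pvQuery, if_pos hd]
      symm; rw [List.find?_eq_none]
      intro m hm
      simp only [List.mem_singleton] at hm
      subst hm
      simp only [decide_eq_true_eq]
      rintro ⟨a, b, _⟩; omega
    · rw [pvQuery, if_neg hd]
      show (if lo ≤ loT ∧ loT < hi ∧ thr < P.getD loT 0 then some loT else none) = _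
      by_cases hp : lo ≤ loT ∧ loT < hi ∧ thr < P.getD loT 0
      · rw [if_pos hp, List.find?_cons_of_pos (by simpa using hp)]
      · rw [if_neg hp, List.find?_cons_of_neg (by simpa using hp), List.find?_nil]
  next h1 =>
    have hm1 : loT < (loT + hiT) / 2 := by omega
    have hm2 : (loT + hiT) / 2 < hiT := by omega
    rw [pvQuery]
    by_cases hd : hiT ≤ lo ∨ hi ≤ loT
    · rw [if_pos hd]
      symm; rw [List.find?_eq_none]
      intro m hm
      rw [List.mem_range'_1] at hm
      simp only [decide_eq_true_eq]
      rintro ⟨a, b, _⟩; omega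
    · rw [if_neg hd]
      simp only []
      by_cases hx : max (pvBuild P loT ((loT + hiT) / 2)).mx (pvBuild P ((loT + hiT) / 2) hiT).mx ≤ thr
      · rw [if_pos hx]
        symm; rw [List.find?_eq_none]
        intro m hm
        rw [List.mem_range'_1] at hm
        simp only [decide_eq_true_eq]
        rintro ⟨_, _, hc⟩
        by_cases hside : m < (loT + hiT) / 2
        · exact absurd hc (not_lt.mpr (le_trans (pvBuild_mx P loT ((loT + hiT) / 2) m (by omega) hside)
            (le_trans (le_max_left _ _) hx)))
        · exact absurd hc (not_lt.mpr (le_trans (pvBuild_mx P ((loT + hiT) / 2) hiT m (by omega) (by omega))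
            (le_trans (le_max_right _ _) hx)))
      · rw [if_neg hx]
        have hsplit := List.range'_append (s := loT) (m := (loT + hiT) / 2 - loT)
          (n := hiT - (loT + hiT) / 2) (step := 1)
        rw [show loT + 1 * ((loT + hiT) / 2 - loT) = (loT + hiT) / 2 from by omega,
            show ((loT + hiT) / 2 - loT) + (hiT - (loT + hiT) / 2) = hiT - loT from by omega] at hsplit
        rw [← hsplit, List.find?_append,
            pvQuery_build P loT ((loT + hiT) / 2) thr lo hi hm1,
            pvQuery_build P ((loT + hiT) / 2) hiT thr lo hi hm2]
        cases (List.range' loT ((loT + hiT) / 2 - loT)).find?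
            (fun m => decide (lo ≤ m ∧ m < hi ∧ thr < P.getD m 0)) with
        | none => simp [Option.or]
        | some m => simp [Option.or]
termination_by hiT - loT
decreasing_by all_goals omega

-- find? is determined by the predicate's values on the list's members
lemma find?_congr_mem {α : Type} (l : List α) (f g : α → Bool) (h : ∀ m ∈ l, f m = g m) :
    l.find? f = l.find? g := by
  induction l with
  | nil => rfl
  | cons x rest ih =>
    simp only [List.find?]
    rw [h x (by simp)]
    cases g x <;> simp [ih (fun m hm => h m (by simp [hm]))]

-- restrict a find? over [0,n) with a window condition to the window itself
lemma find?_window (q : Nat → Prop) [DecidablePred q] (n lo hi : Nat) (hlo : lo ≤ hi) (hhi : hi ≤ n) :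
    (List.range' 0 n).find? (fun m => decide (lo ≤ m ∧ m < hi ∧ q m))
      = (List.range' lo (hi - lo)).find? (fun m => decide (q m)) := by
  have e1 := List.range'_append (s := lo) (m := hi - lo) (n := n - hi) (step := 1)
  rw [show lo + 1 * (hi - lo) = hi from by omega,
      show (hi - lo) + (n - hi) = n - lo from by omega] at e1
  have e2 := List.range'_append (s := 0) (m := lo) (n := n - lo) (step := 1)
  rw [show 0 + 1 * lo = lo from by omega, show lo + (n - lo) = n from by omega] at e2
  rw [← e2, ← e1, List.find?_append, List.find?_append]
  have h1 : (List.range' 0 lo).find? (fun m => decide (lo ≤ m ∧ m < hi ∧ q m)) = none := by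
    rw [List.find?_eq_none]; intro m hm
    rw [List.mem_range'_1] at hm
    simp only [decide_eq_true_eq]; rintro ⟨a, _, _⟩; omega
  have h3 : (List.range' hi (n - hi)).find? (fun m => decide (lo ≤ m ∧ m < hi ∧ q m)) = none := by
    rw [List.find?_eq_none]; intro m hm
    rw [List.mem_range'_1] at hm
    simp only [decide_eq_true_eq]; rintro ⟨_, b, _⟩; omega
  have h2 : (List.range' lo (hi - lo)).find? (fun m => decide (lo ≤ m ∧ m < hi ∧ q m))
      = (List.range' lo (hi - lo)).find? (fun m => decide (q m)) := by
    apply find?_congr_mem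
    intro m hm
    rw [List.mem_range'_1] at hm
    simp only [decide_eq_decide]
    constructor
    · rintro ⟨_, _, c⟩; exact c
    · intro c; exact ⟨by omega, by omega, c⟩
  rw [h1, h2, h3, Option.or_none]
  simp [Option.or]

lemma sum_take_succ (tg : List Int) (j : Nat) (h : j < tg.length) :
    (tg.take (j + 1)).sum = (tg.take j).sum + tg.getD j 0 := by
  have h2 : tg.take (j + 1) = tg.take j ++ [tg[j]] := by
    rw [List.take_add_one]; simp [List.getElem?_eq_getElem h]
  rw [h2, List.sum_append]
  simp [List.getD, List.getElem?_eq_getElem h]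

lemma pvAFor_spec (tg : List Int) (k : Int) (n j0 jp : Nat) (hlen : j0 + n ≤ tg.length) :
    pvAFor tg k (List.range' j0 n) ((tg.take j0).sum) jp
      = match (List.range' j0 n).find? (fun j => decide (k < (tg.take (j + 1)).sum)) with
        | some j => (j, (tg.take (j + 1)).sum, true)
        | none => ((if n = 0 then jp else j0 + n - 1), (tg.take (j0 + n)).sum, false) := by
  induction n generalizing j0 jp with
  | zero => simp [pvAFor]
  | succ n ih =>
    rw [List.range'_succ]
    simp only [pvAFor]
    have hs : (tg.take j0).sum + PySem.List.pyGetD tg (j0 : Int) 0 = (tg.take (j0 + 1)).sum := by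
      rw [sum_take_succ tg j0 (by omega), PySem.List.pyGetD_natCast]
    rw [hs]
    by_cases hb : (tg.take (j0 + 1)).sum > k
    · rw [if_pos hb, List.find?_cons_of_pos (by simpa using hb)]
    · rw [if_neg hb, List.find?_cons_of_neg (by simpa using hb), ih (j0 + 1) j0 (by omega)]
      cases hf : (List.range' (j0 + 1) n).find? (fun j => decide (k < (tg.take (j + 1)).sum)) with
      | some j => simp
      | none =>
        simp only []
        have h3 : j0 + 1 + n = j0 + (n + 1) := by omega
        rw [h3]
        by_cases hn : n = 0 <;> simp [hn]

-- ===== VERDICT (by name: the statement is the Claim_ definition above) =====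
theorem build_f_spec : Claim_equal_build_f := by
  intro g k _
  unfold Spec_build_f
  simp only [build_f, build_f_alt]
  apply List.map_congr_left
  intro i hi
  rw [List.mem_range] at hi
  have hN1 : 1 ≤ g.length := by omega
  set N := g.length with hN
  set D := g ++ g with hD
  set P := pvPrefix D 0 with hPdef
  have hDlen : D.length = N + N := by simp [hD, hN]
  have hPlen : P.length = N + N + 1 := by rw [hPdef, pvPrefix_length, hDlen]
  have hP : ∀ m, m ≤ N + N → P.getD m 0 = (D.take m).sum := by
    intro m hm
    rw [hPdef, pvPrefix_getD D 0 m (by omega)]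
    ring
  have htg : PySem.List.slice g (some (i : Int)) none ++ PySem.List.slice g none (some (i : Int))
      = g.drop i ++ g.take i := by
    rw [PySem.List.slice_from_natCast, PySem.List.slice_to_natCast]
  rw [htg]
  set tg := g.drop i ++ g.take i with htgdef
  have htglen : tg.length = N := by
    simp only [htgdef, List.length_append, List.length_drop, List.length_take, ← hN]
    omega
  have htake : ∀ m, m ≤ N → tg.take m = (D.drop i).take m := by
    intro m hm
    have hdl : (g.drop i).length = N - i := by simp [hN]
    rw [htgdef, hD, List.drop_append_of_le_length (by omega), List.take_append, List.take_append,
        List.take_take, hdl]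
    congr 2
    omega
  have hsum : ∀ m, m ≤ N → (tg.take m).sum = (D.take (i + m)).sum - (D.take i).sum := by
    intro m hm
    rw [htake m hm]
    have h1 : D.take (i + m) = D.take i ++ (D.drop i).take m := List.take_add
    have h2 : (D.take (i + m)).sum = (D.take i).sum + ((D.drop i).take m).sum := by
      rw [h1]; simp
    omega
  -- A side: evaluate the inner loop
  have hA := pvAFor_spec tg k N 0 0 (by omega)
  simp only [List.take_zero, List.sum_nil] at hA
  rw [← List.range_eq_range'] at hA
  rw [hA]
  -- B side: evaluate the query
  rw [pvQuery_build P 0 P.length (k + P.getD i 0) (i + 1) (i + N + 1) (by omega),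
      show P.length - 0 = N + N + 1 from by omega,
      find?_window (fun m => k + P.getD i 0 < P.getD m 0) (N + N + 1) (i + 1) (i + N + 1)
        (by omega) (by omega),
      show (i + N + 1) - (i + 1) = N from by omega,
      List.range'_eq_map_range, List.find?_map]
  have hpred : ∀ j ∈ List.range N,
      ((fun m => decide (k + P.getD i 0 < P.getD m 0)) ∘ (fun x => i + 1 + x)) j
        = (fun j => decide (k < (tg.take (j + 1)).sum)) j := by
    intro j hj
    rw [List.mem_range] at hj
    simp only [Function.comp_apply, decide_eq_decide]
    rw [hP (i + 1 + j) (by omega), hP i (by omega),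
        show i + 1 + j = i + (j + 1) from by omega, hsum (j + 1) (by omega)]
    constructor <;> intro <;> omega
  rw [find?_congr_mem _ _ _ hpred]
  cases hF : (List.range N).find? (fun j => decide (k < (tg.take (j + 1)).sum)) with
  | none =>
    have hN0 : ¬ (N = 0) := by omega
    simp only [Option.map_none, hN0, if_false, Bool.false_eq_true, Nat.zero_add,
      add_sub_cancel_right]
    rw [hsum N le_rfl, hP (i + N) (by omega), hP i (by omega)]
  | some j =>
    have hj : j < N := by
      have := List.mem_of_find?_eq_some hF
      rwa [List.mem_range] at this
    simp only [Option.map_some, if_true]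
    rw [show i + 1 + j - 1 - i = j from by omega, show i + 1 + j - 1 = i + j from by omega,
        PySem.List.pyGetD_natCast]
    congr 1
    rw [hP (i + j) (by omega), hP i (by omega)]
    have h1 := sum_take_succ tg j (by omega)
    have h2 := hsum j (by omega)
    omega
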